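-- pv_equiv track=rewrite | github.com/piti03/advents_test_py | day3.py | give_array_score
-- ===== SOURCE A (Python) =====
-- def give_array_score(arr):
--     finalScore = 0
--     model = {'a':1, 'b':2, 'c':3, 'd':4, 'e':5, 'f':6, 'g':7, 'h':8
--     ,'i':9, 'j':10, 'k':11, 'l':12, 'm':13, 'n':14, 'o':15, 'p':16
--     ,'q':17, 'r':18, 's':19, 't':20, 'u':21, 'v':22, 'w':23, 'x':24
--     , 'y':25,'z':26,'A':27, 'B':28, 'C':29, 'D':30, 'E':31, 'F':32
--     , 'G':33, 'H':34, 'I':35, 'J':36, 'K':37, 'L':38, 'M':39, 'N':40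
--     , 'O':41, 'P':42, 'Q':43, 'R':44, 'S':45, 'T':46, 'U':47, 'V':48
--     , 'W':49, 'X': 50, 'Y':51, 'Z':52}
--     for i in arr:
--         finalScore += model.get(i)
--     return finalScore
-- ===== SOURCE B (Python) =====
-- def give_array_score(arr):
--     counts = {}
--     for c in arr:
--         counts[c] = counts.get(c, 0) + 1
--     letters = "abcdefghijklmnopqrstuvwxyzABCDEFGHIJKLMNOPQRSTUVWXYZ"
--     total = 0
--     for c, n in counts.items():
--         total += n * (letters.index(c) + 1)
--     return total
-- ===== Notes on version B (the rewrite author's own statement) =====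
-- stated objective: alternative
-- what changed: Replaces A's single pass that looks each element up in a 52-entry literal dict and accumulates with two staged passes: first build a frequency counter of the input, then sum count*priority over the distinct keys only (priority read off one alphabet string).
import Mathlib
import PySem

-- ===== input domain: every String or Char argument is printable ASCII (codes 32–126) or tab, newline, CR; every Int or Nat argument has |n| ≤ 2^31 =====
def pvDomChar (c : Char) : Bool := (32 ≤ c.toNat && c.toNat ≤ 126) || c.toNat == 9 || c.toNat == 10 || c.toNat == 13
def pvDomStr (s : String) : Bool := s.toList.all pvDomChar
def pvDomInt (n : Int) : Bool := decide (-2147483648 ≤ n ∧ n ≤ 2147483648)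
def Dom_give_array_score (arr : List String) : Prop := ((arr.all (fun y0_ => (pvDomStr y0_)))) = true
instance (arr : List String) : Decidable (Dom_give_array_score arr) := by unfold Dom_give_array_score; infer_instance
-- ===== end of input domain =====

-- B replaces A's per-element dict-lookup accumulation with two staged passes: build a frequency counter, then sum count*priority over the distinct keys only (alternative decomposition; same cost).

-- ===== PORT A =====
-- the literal dict from A's source (insertion order, distinct keys)
def pvModel : PySem.Dict String Int := PySem.Dict.ofList
  [("a",1), ("b",2), ("c",3), ("d",4), ("e",5), ("f",6), ("g",7), ("h",8),
   ("i",9), ("j",10), ("k",11), ("l",12), ("m",13), ("n",14), ("o",15), ("p",16),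
   ("q",17), ("r",18), ("s",19), ("t",20), ("u",21), ("v",22), ("w",23), ("x",24),
   ("y",25), ("z",26), ("A",27), ("B",28), ("C",29), ("D",30), ("E",31), ("F",32),
   ("G",33), ("H",34), ("I",35), ("J",36), ("K",37), ("L",38), ("M",39), ("N",40),
   ("O",41), ("P",42), ("Q",43), ("R",44), ("S",45), ("T",46), ("U",47), ("V",48),
   ("W",49), ("X",50), ("Y",51), ("Z",52)]

-- 'finalScore += model.get(i)': model.get(i) is None (→ TypeError) when i is not a key;
-- that case is excluded by Pre_, so the getD default is never reached inside Pre_.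
def give_array_score (arr : List String) : Int :=
  arr.foldl (fun finalScore i => finalScore + (PySem.Dict.get? pvModel i).getD 0) 0

-- ===== PORT B =====
def pvLetters : String := "abcdefghijklmnopqrstuvwxyzABCDEFGHIJKLMNOPQRSTUVWXYZ"

-- 'counts[c] = counts.get(c, 0) + 1' then 'for c, n in counts.items(): total += n * (letters.index(c) + 1)'
-- letters.index raises ValueError (find = -1) only when c is not a substring of letters, excluded by Pre_.
def give_array_score_alt (arr : List String) : Int :=
  let counts := arr.foldl (fun d c => d.insert c (d.getD c 0 + 1)) PySem.Dict.empty
  counts.items.foldl (fun total cn => total + cn.2 * (PySem.Str.find pvLetters cn.1 + 1)) 0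

-- ===== PRECONDITION & SPEC =====
-- Pre_: every element is one of the 52 letter keys -- exactly the inputs where A's model.get
-- yields a value (elsewhere 'finalScore += None' raises TypeError).
def Pre_give_array_score (arr : List String) : Prop :=
  ∀ s ∈ arr, s ∈ ["a","b","c","d","e","f","g","h","i","j","k","l","m","n","o","p","q","r","s","t","u","v","w","x","y","z",
                  "A","B","C","D","E","F","G","H","I","J","K","L","M","N","O","P","Q","R","S","T","U","V","W","X","Y","Z"]
instance (arr : List String) : Decidable (Pre_give_array_score arr) := by unfold Pre_give_array_score; infer_instance

def pvWitness_give_array_score : List String := ["a", "Z", "m"]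

def Spec_give_array_score (arr : List String) (out : Int) : Prop := out = give_array_score_alt arr
instance (arr : List String) (out : Int) : Decidable (Spec_give_array_score arr out) := by unfold Spec_give_array_score; infer_instance

-- ===== CLAIM (what is proved, stated in full; the proofs are below) =====
def Claim_equal_give_array_score : Prop := ∀ (arr : List String), Dom_give_array_score arr → Pre_give_array_score arr → Spec_give_array_score arr (give_array_score arr)

-- ===== LEMMAS AND PROOFS =====

-- a point mass inside a duplicate-free list sums to its value
theorem pv_sum_single (s : List String) (c : String) (v : Int)
    (hs : s.Nodup) (hc : c ∈ s) :
    (s.map (fun k => if k = c then v else 0)).sum = v := by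
  induction s with
  | nil => cases hc
  | cons x t ih =>
    rcases List.mem_cons.1 hc with rfl | h
    · have hx : c ∉ t := (List.nodup_cons.1 hs).1
      simp only [List.map_cons, List.sum_cons]
      have hz : (t.map (fun k => if k = c then v else 0)).sum = 0 := by
        rw [List.sum_eq_zero]
        intro y hy
        obtain ⟨k, hk, rfl⟩ := List.mem_map.1 hy
        rw [if_neg (fun h' : k = c => hx (h' ▸ hk))]
      rw [hz, add_zero]
      simp
    · have hx : x ≠ c := fun h' => (List.nodup_cons.1 hs).1 (h' ▸ h)
      simp only [List.map_cons, List.sum_cons, if_neg hx]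
      rw [zero_add, ih (List.nodup_cons.1 hs).2 h]

-- grouping identity: a sum over the list equals the count-weighted sum over its distinct elements
theorem pv_sum_counts (l : List String) (f : String → Int) :
    ((PySem.Set.ofList l).map (fun k => (l.count k : Int) * f k)).sum = (l.map f).sum := by
  induction l using List.reverseRecOn with
  | nil => simp [PySem.Set.ofList]
  | append_singleton xs c ih =>
    rw [PySem.Set.ofList_append_singleton]
    have hcnt : ∀ k, ((xs ++ [c]).count k : Int) = (xs.count k : Int) + (if k = c then 1 else 0) := by
      intro k
      rw [List.count_append]
      push_cast
      by_cases h : k = c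
      · simp [h]
      · rw [if_neg h, List.count_eq_zero_of_not_mem (by simp [h] : k ∉ [c])]
        push_cast
        ring
    by_cases hc : c ∈ PySem.Set.ofList xs
    · rw [PySem.Set.add_of_mem hc]
      have h1 : ((PySem.Set.ofList xs).map (fun k => ((xs ++ [c]).count k : Int) * f k)).sum
          = ((PySem.Set.ofList xs).map (fun k => (xs.count k : Int) * f k + (if k = c then f c else 0))).sum := by
        refine congrArg List.sum (List.map_congr_left (fun k _ => ?_))
        rw [hcnt k]
        by_cases h : k = c <;> simp [h]; ring
      rw [h1, PySem.List.sum_map_add_int, ih,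
          pv_sum_single (PySem.Set.ofList xs) c (f c) (PySem.Set.nodup_ofList xs) hc]
      simp
    · rw [PySem.Set.add_of_not_mem hc]
      have hcx : c ∉ xs := fun h => hc ((PySem.Set.mem_ofList _ _).2 h)
      rw [List.map_append, List.sum_append]
      have h1 : ((PySem.Set.ofList xs).map (fun k => ((xs ++ [c]).count k : Int) * f k)).sum
          = ((PySem.Set.ofList xs).map (fun k => (xs.count k : Int) * f k)).sum := by
        refine congrArg List.sum (List.map_congr_left (fun k hk => ?_))
        have hkc : k ≠ c := fun h' => hcx (h' ▸ (PySem.Set.mem_ofList _ _).1 hk)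
        rw [hcnt k, if_neg hkc, add_zero]
      have h2 : (([c] : List String).map (fun k => ((xs ++ [c]).count k : Int) * f k)).sum = f c := by
        simp [List.count_append, List.count_singleton, List.count_eq_zero_of_not_mem hcx]
      rw [h1, h2, ih]
      simp

-- per-key agreement on each of the 52 letter keys: B's position score is A's table score
set_option maxRecDepth 4096 in
theorem pv_key_eq (s : String)
    (hs : s ∈ ["a","b","c","d","e","f","g","h","i","j","k","l","m","n","o","p","q","r","s","t","u","v","w","x","y","z",
               "A","B","C","D","E","F","G","H","I","J","K","L","M","N","O","P","Q","R","S","T","U","V","W","X","Y","Z"]) :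
    PySem.Str.find pvLetters s + 1 = (PySem.Dict.get? pvModel s).getD 0 := by
  revert s hs; decide

-- ===== VERDICT (by name: the statement is the Claim_ definition above) =====
theorem give_array_score_spec : Claim_equal_give_array_score := by
  intro arr _ hpre
  unfold Spec_give_array_score give_array_score give_array_score_alt
  dsimp only
  rw [PySem.Dict.foldl_insert_getD_add_one_eq_counter, PySem.List.foldl_add, PySem.List.foldl_add,
      zero_add, zero_add, PySem.Dict.items_counter, List.map_map]
  have h1 : ((PySem.Set.ofList arr).map
        ((fun (cn : String × Int) => cn.2 * (PySem.Str.find pvLetters cn.1 + 1)) ∘ fun k => (k, (arr.count k : Int)))).sum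
      = ((PySem.Set.ofList arr).map (fun k => (arr.count k : Int) * ((PySem.Dict.get? pvModel k).getD 0))).sum := by
    refine congrArg List.sum (List.map_congr_left (fun k hk => ?_))
    have : k ∈ arr := (PySem.Set.mem_ofList _ _).1 hk
    simp only [Function.comp]
    rw [pv_key_eq k (hpre k this)]
  rw [h1, pv_sum_counts arr (fun k => (PySem.Dict.get? pvModel k).getD 0)]
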